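-- pv_equiv track=rewrite | github.com/gian-s/text_analysis | text_model_class.py | sentence_lengths
-- ===== SOURCE A (Python) =====
-- def sentence_lengths(s):
--     """inputs a string s, returns a list with all the lengths of sentences
--     """
--     s = s.replace('!','.')
--     s = s.replace('?','.')
--     s = s.replace(';','.')
--     s = s.replace('"','')
--     s = s.replace("'",'')
--     s = s.split('.')
--     s = s[:-1]
--     sen_len = []
--     for i in range(len(s)):
--         s[i] = s[i].split(' ')
--     for i in range(1,len(s)):
--         s[i] = s[i][1:]
--     for i in range(len(s)):
--         sen_len += [len(s[i])]
--     return sen_len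
-- ===== SOURCE B (Python) =====
-- def sentence_lengths(s):
--     """inputs a string s, returns a list with all the lengths of sentences
--     """
--     # One pass over the characters: no replace/split at all.  Each sentence's
--     # word count is the number of spaces inside it, plus one for the very
--     # first sentence (later sentences start right after a terminator, so the
--     # fragment before their first space is the empty token A discards).
--     res = []
--     spaces = 0
--     bonus = 1
--     for ch in s:
--         if ch in '.!?;':
--             res.append(spaces + bonus)
--             spaces = 0
--             bonus = 0
--         elif ch == ' ':
--             spaces += 1
--         # quotes and all other characters do not affect word counts
--     return res
-- ===== Notes on version B (the rewrite author's own statement) =====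
-- stated objective: alternative
-- what changed: B replaces A's staged pipeline (five replace passes, split on '.', drop-last, per-sentence word-list splits and [1:] trims) by a single character-level state machine over the original string: one pass keeping a running space counter, emitting a sentence length at each terminator, never building intermediate strings or token lists.
import Mathlib
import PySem

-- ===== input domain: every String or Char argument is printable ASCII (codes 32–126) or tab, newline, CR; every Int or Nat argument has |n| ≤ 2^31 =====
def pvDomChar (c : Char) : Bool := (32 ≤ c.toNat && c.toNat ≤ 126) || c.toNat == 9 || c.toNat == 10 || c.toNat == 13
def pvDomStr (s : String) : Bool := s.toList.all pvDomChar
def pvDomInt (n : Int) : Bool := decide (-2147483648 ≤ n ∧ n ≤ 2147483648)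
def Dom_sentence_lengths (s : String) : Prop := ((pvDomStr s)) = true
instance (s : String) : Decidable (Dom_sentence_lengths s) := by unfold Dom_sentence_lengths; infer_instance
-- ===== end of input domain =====

-- B replaces A's staged pipeline (replace passes, split, drop-last, per-sentence splits/trims)
-- by one character-level pass with a running space counter — an alternative algorithm.

-- ===== PORT A =====
def sentence_lengths (s : String) : List Int :=
  let c1 := PySem.Chars.replace s.toList ['!'] ['.']
  let c2 := PySem.Chars.replace c1 ['?'] ['.']
  let c3 := PySem.Chars.replace c2 [';'] ['.']
  let c4 := PySem.Chars.replace c3 ['"'] []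
  let c5 := PySem.Chars.replace c4 ['\''] []
  let parts := PySem.Chars.splitOn c5 ['.']
  let parts2 := PySem.List.slice parts none (some (-1))      -- s = s[:-1]
  -- first loop: s[i] = s[i].split(' ')
  let ws := parts2.map (fun p => PySem.Chars.splitOn p [' '])
  -- second loop: for i in range(1, len(s)): s[i] = s[i][1:]
  let ws2 := (PySem.List.enumerate ws).map
    (fun iw => if 1 ≤ iw.1 then PySem.List.slice iw.2 (some 1) none else iw.2)
  -- third loop: sen_len += [len(s[i])]
  ws2.foldl (fun acc w => acc ++ [(w.length : Int)]) []

-- ===== PORT B =====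
-- one for-loop over the characters with state (res, spaces, bonus)
def sentence_lengths_alt (s : String) : List Int :=
  (s.toList.foldl
    (fun (st : List Int × Int × Int) ch =>
      if ch ∈ ['.', '!', '?', ';'] then (st.1 ++ [st.2.1 + st.2.2], 0, 0)
      else if ch = ' ' then (st.1, st.2.1 + 1, st.2.2)
      else st)
    ([], 0, 1)).1

-- ===== PRECONDITION & SPEC =====
def Spec_sentence_lengths (s : String) (out : List Int) : Prop := out = sentence_lengths_alt s
instance (s : String) (out : List Int) : Decidable (Spec_sentence_lengths s out) := by unfold Spec_sentence_lengths; infer_instance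

-- ===== CLAIM (what is proved, stated in full; the proofs are below) =====
def Claim_equal_sentence_lengths : Prop := ∀ (s : String), Dom_sentence_lengths s → Spec_sentence_lengths s (sentence_lengths s)

-- ===== LEMMAS AND PROOFS =====

-- pure recursive description of B's loop
def pvLens : List Char → Int → Int → List Int
  | [], _, _ => []
  | c :: r, sp, b =>
    if c ∈ ['.', '!', '?', ';'] then (sp + b) :: pvLens r 0 0
    else if c = ' ' then pvLens r (sp + 1) b
    else pvLens r sp b

-- '.'-split as a simple structural recursion
def pvSegs : List Char → List (List Char)
  | [] => [[]]
  | c :: r => if c = '.' then [] :: pvSegs r else (pvSegs r).modifyHead (c :: ·)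

-- lengths computed from the segment list (head gets the carried sp+b credit)
def pvTarget : List (List Char) → Int → Int → List Int
  | [], _, _ => []
  | [_], _, _ => []
  | seg :: rest, sp, b => (sp + b + (PySem.Chars.count seg [' '] : Int)) :: pvTarget rest 0 0

lemma pvSegs_ne_nil (l : List Char) : pvSegs l ≠ [] := by
  induction l with
  | nil => simp [pvSegs]
  | cons c r ih =>
    simp only [pvSegs]
    split
    · simp
    · cases h : pvSegs r with
      | nil => exact absurd h ih
      | cons a t => simp [List.modifyHead]

-- B's foldl equals pvLens
lemma foldl_eq_pvLens : ∀ (cs : List Char) (acc : List Int) (sp b : Int),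
    (cs.foldl
      (fun (st : List Int × Int × Int) ch =>
        if ch ∈ ['.', '!', '?', ';'] then (st.1 ++ [st.2.1 + st.2.2], 0, 0)
        else if ch = ' ' then (st.1, st.2.1 + 1, st.2.2)
        else st)
      (acc, sp, b)).1 = acc ++ pvLens cs sp b := by
  intro cs
  induction cs with
  | nil => intro acc sp b; simp [pvLens]
  | cons c r ih =>
    intro acc sp b
    simp only [List.foldl_cons, pvLens]
    by_cases h1 : c ∈ ['.', '!', '?', ';']
    · rw [if_pos h1, if_pos h1, ih]; simp
    · by_cases h2 : c = ' '
      · rw [if_neg h1, if_neg h1, if_pos h2, if_pos h2, ih]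
      · rw [if_neg h1, if_neg h1, if_neg h2, if_neg h2, ih]

-- replace by a single character is a map
lemma replace_go_single (x y : Char) : ∀ (fuel : Nat) (l acc : List Char), l.length ≤ fuel →
    PySem.Chars.replace.go [x] [y] fuel l acc
      = acc.reverse ++ l.map (fun c => if c = x then y else c) := by
  intro fuel
  induction fuel with
  | zero =>
    intro l acc h
    have : l = [] := List.eq_nil_of_length_eq_zero (Nat.le_zero.mp h)
    subst this; simp [PySem.Chars.replace.go]
  | succ f ih =>
    intro l acc h
    cases l with
    | nil => simp [PySem.Chars.replace.go]
    | cons c rest =>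
      rw [PySem.Chars.replace.go.eq_def]
      simp only
      have hpre : (List.isPrefixOf [x] (c :: rest)) = (x == c) := by
        simp [List.isPrefixOf]
      rw [hpre]
      by_cases hc : c = x
      · subst hc
        rw [if_pos (by simp)]
        have hdrop : List.drop ([c] : List Char).length (c :: rest) = rest := by simp
        rw [hdrop, ih rest ([y].reverse ++ acc) (by simp at h ⊢; omega)]
        simp
      · rw [if_neg (by simp [beq_iff_eq, Ne.symm hc])]
        rw [ih rest (c :: acc) (by simp at h ⊢; omega)]
        simp [if_neg hc]

-- removing a single character is a filter
lemma replace_go_del (x : Char) : ∀ (fuel : Nat) (l acc : List Char), l.length ≤ fuel →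
    PySem.Chars.replace.go [x] [] fuel l acc
      = acc.reverse ++ l.filter (fun c => c != x) := by
  intro fuel
  induction fuel with
  | zero =>
    intro l acc h
    have : l = [] := List.eq_nil_of_length_eq_zero (Nat.le_zero.mp h)
    subst this; simp [PySem.Chars.replace.go]
  | succ f ih =>
    intro l acc h
    cases l with
    | nil => simp [PySem.Chars.replace.go]
    | cons c rest =>
      rw [PySem.Chars.replace.go.eq_def]
      simp only
      have hpre : (List.isPrefixOf [x] (c :: rest)) = (x == c) := by
        simp [List.isPrefixOf]
      rw [hpre]
      by_cases hc : c = x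
      · subst hc
        rw [if_pos (by simp)]
        have hdrop : List.drop ([c] : List Char).length (c :: rest) = rest := by simp
        rw [hdrop, ih rest ([].reverse ++ acc) (by simp at h ⊢; omega)]
        simp
      · rw [if_neg (by simp [beq_iff_eq, Ne.symm hc])]
        rw [ih rest (c :: acc) (by simp at h ⊢; omega)]
        simp [hc]

lemma replace_single (x y : Char) (l : List Char) :
    PySem.Chars.replace l [x] [y] = l.map (fun c => if c = x then y else c) := by
  rw [PySem.Chars.replace]
  simp only [List.isEmpty_cons, if_neg Bool.false_ne_true]
  simpa using replace_go_single x y l.length l [] le_rfl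

lemma replace_del (x : Char) (l : List Char) :
    PySem.Chars.replace l [x] [] = l.filter (fun c => c != x) := by
  rw [PySem.Chars.replace]
  simp only [List.isEmpty_cons, if_neg Bool.false_ne_true]
  simpa using replace_go_del x l.length l [] le_rfl

-- splitOn '.' is pvSegs
lemma splitOn_go_eq_pvSegs : ∀ (fuel : Nat) (l cur : List Char) (acc : List (List Char)),
    l.length < fuel →
    PySem.Chars.splitOn.go ['.'] fuel l cur acc
      = acc.reverse ++ (pvSegs l).modifyHead (cur.reverse ++ ·) := by
  intro fuel
  induction fuel with
  | zero => intro l cur acc h; omega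
  | succ f ih =>
    intro l cur acc h
    cases l with
    | nil =>
      rw [PySem.Chars.splitOn.go.eq_def]
      simp [pvSegs, List.modifyHead]
    | cons c rest =>
      rw [PySem.Chars.splitOn.go.eq_def]
      simp only
      by_cases hc : c = '.'
      · subst hc
        rw [if_pos (by simp [List.isPrefixOf])]
        have hdrop : List.drop (['.'] : List Char).length ('.' :: rest) = rest := by simp
        rw [hdrop, ih rest [] (cur.reverse :: acc) (by simp at h ⊢; omega)]
        simp only [pvSegs, if_pos rfl]
        cases hs : pvSegs rest with
        | nil => exact absurd hs (pvSegs_ne_nil rest)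
        | cons a t => simp [List.modifyHead]
      · rw [if_neg (by simp [List.isPrefixOf, beq_iff_eq, Ne.symm hc])]
        rw [ih rest (c :: cur) acc (by simp at h ⊢; omega)]
        simp only [pvSegs, if_neg hc]
        cases hs : pvSegs rest with
        | nil => exact absurd hs (pvSegs_ne_nil rest)
        | cons a t => simp [List.modifyHead]

lemma splitOn_eq_pvSegs (l : List Char) :
    PySem.Chars.splitOn l ['.'] = pvSegs l := by
  rw [PySem.Chars.splitOn]
  rw [splitOn_go_eq_pvSegs (l.length + 1) l [] [] (by omega)]
  cases hs : pvSegs l with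
  | nil => exact absurd hs (pvSegs_ne_nil l)
  | cons a t => simp [List.modifyHead]

-- count.go's accumulator shifts out
lemma count_go_acc (sub : List Char) : ∀ (fuel : Nat) (l : List Char) (n : Nat),
    PySem.Chars.count.go sub fuel l n = n + PySem.Chars.count.go sub fuel l 0 := by
  intro fuel
  induction fuel with
  | zero => intro l n; simp [PySem.Chars.count.go]
  | succ f ih =>
    intro l n
    cases l with
    | nil => simp [PySem.Chars.count.go]
    | cons c rest =>
      rw [PySem.Chars.count.go.eq_def]
      conv_rhs => rw [PySem.Chars.count.go.eq_def]
      simp only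
      split_ifs with h
      · rw [ih _ (n+1), ih _ 1]; omega
      · exact ih rest n

-- consing a non-'.' character onto the head segment
lemma pvTarget_modifyHead (c : Char) : ∀ (segs : List (List Char)) (sp b : Int),
    pvTarget (segs.modifyHead (c :: ·)) sp b
      = pvTarget segs (sp + (if c = ' ' then 1 else 0)) b := by
  intro segs sp b
  cases segs with
  | nil => simp [List.modifyHead, pvTarget]
  | cons seg rest =>
    cases rest with
    | nil => simp [List.modifyHead, pvTarget]
    | cons a t =>
      simp only [List.modifyHead, pvTarget]
      congr 1
      have : PySem.Chars.count (c :: seg) [' ']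
          = (if c = ' ' then 1 else 0) + PySem.Chars.count seg [' '] := by
        rw [PySem.Chars.count, PySem.Chars.count]
        simp only [List.isEmpty_cons, if_neg Bool.false_ne_true, List.length_cons]
        rw [PySem.Chars.count.go.eq_def]
        simp only
        have hpre : (List.isPrefixOf [' '] (c :: seg)) = (' ' == c) := by
          simp [List.isPrefixOf]
        simp only [hpre]
        by_cases hc : c = ' '
        · subst hc
          rw [if_pos (by simp)]
          have hdrop : List.drop ([' '] : List Char).length (' ' :: seg) = seg := by simp
          rw [hdrop, count_go_acc]
          simp
        · rw [if_neg (by simp [beq_iff_eq, Ne.symm hc]), if_neg hc]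
          omega
      rw [this]; push_cast; ring

-- normalisation and quote-removal as pure functions
def pvNorm (c : Char) : Char :=
  if c = ';' then '.' else if c = '?' then '.' else if c = '!' then '.' else c

def pvClean (cs : List Char) : List Char :=
  ((cs.map pvNorm).filter (fun c => c != '"')).filter (fun c => c != '\'')

-- the state machine computes pvTarget of the cleaned-up segments
lemma pvLens_eq_pvTarget : ∀ (cs : List Char) (sp b : Int),
    pvLens cs sp b = pvTarget (pvSegs (pvClean cs)) sp b := by
  intro cs
  induction cs with
  | nil => intro sp b; simp [pvLens, pvClean, pvSegs, pvTarget]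
  | cons c r ih =>
    intro sp b
    by_cases hterm : c ∈ ['.', '!', '?', ';']
    · have h4 := hterm
      simp only [List.mem_cons, List.mem_singleton, List.not_mem_nil, or_false] at h4
      have hcl : pvClean (c :: r) = '.' :: pvClean r := by
        rcases h4 with rfl | rfl | rfl | rfl <;> simp [pvClean, pvNorm]
      simp only [pvLens, if_pos hterm, hcl, pvSegs, if_pos rfl]
      cases hs : pvSegs (pvClean r) with
      | nil => exact absurd hs (pvSegs_ne_nil _)
      | cons a t =>
        simp only [if_true]
        have hc0 : (PySem.Chars.count ([] : List Char) [' '] : Int) = 0 := by decide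
        simp only [pvTarget, hc0, add_zero]
        rw [ih 0 0, hs]
    · have hne : c ≠ '.' ∧ c ≠ '!' ∧ c ≠ '?' ∧ c ≠ ';' := by
        simp only [List.mem_cons, List.mem_singleton] at hterm
        tauto
      have hnorm : pvNorm c = c := by simp [pvNorm, hne.2.1, hne.2.2.1, hne.2.2.2]
      by_cases hq : c = '"' ∨ c = '\''
      · have hsp : c ≠ ' ' := by rcases hq with rfl | rfl <;> decide
        have hcl : pvClean (c :: r) = pvClean r := by
          rcases hq with rfl | rfl <;> simp [pvClean, pvNorm]
        simp only [pvLens, if_neg hterm, if_neg hsp, hcl]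
        exact ih sp b
      · push_neg at hq
        have hcl : pvClean (c :: r) = c :: pvClean r := by
          simp [pvClean, hnorm, hq.1, hq.2]
        simp only [pvLens, if_neg hterm, hcl, pvSegs, if_neg hne.1]
        rw [pvTarget_modifyHead]
        by_cases hsp : c = ' '
        · rw [if_pos hsp, if_pos hsp, ih]
        · rw [if_neg hsp, if_neg hsp, ih]; simp

-- positive indices all take the else branch
lemma enumerate_map_pos :
    ∀ (r : List (List Char)) (k : Int), 1 ≤ k →
    (PySem.List.enumerate r k).map
      (fun ip => if ip.1 = 0 then (PySem.Chars.count ip.2 [' '] : Int) + 1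
                 else (PySem.Chars.count ip.2 [' '] : Int))
      = r.map (fun seg => (PySem.Chars.count seg [' '] : Int)) := by
  intro r
  induction r with
  | nil => intro k hk; simp [PySem.List.enumerate]
  | cons x t ih =>
    intro k hk
    rw [PySem.List.enumerate]
    simp only [List.map_cons]
    rw [if_neg (by omega), ih (k + 1) (by omega)]

-- pvTarget with credit 0 0 is just the '.'-delimited space counts of all but the last segment
lemma pvTarget_zero : ∀ (segs : List (List Char)),
    pvTarget segs 0 0 = segs.dropLast.map (fun seg => (PySem.Chars.count seg [' '] : Int)) := by
  intro segs
  induction segs with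
  | nil => simp [pvTarget]
  | cons seg rest ih =>
    cases rest with
    | nil => simp [pvTarget]
    | cons a t =>
      simp only [pvTarget, List.dropLast_cons_of_ne_nil (List.cons_ne_nil a t), List.map_cons]
      rw [ih]; norm_num

-- splitOn.go produces exactly one more piece than count.go counts separators
lemma splitOn_go_length (sep : List Char) (hs : sep ≠ []) :
    ∀ (fuel1 : Nat) (l cur : List Char) (acc : List (List Char)) (fuel2 : Nat),
    l.length ≤ fuel1 → l.length ≤ fuel2 →
    (PySem.Chars.splitOn.go sep fuel1 l cur acc).length
      = acc.length + 1 + PySem.Chars.count.go sep fuel2 l 0 := by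
  intro fuel1
  induction fuel1 with
  | zero =>
    intro l cur acc fuel2 h1 h2
    have hl : l = [] := List.eq_nil_of_length_eq_zero (Nat.le_zero.mp h1)
    subst hl
    rw [PySem.Chars.splitOn.go.eq_def, PySem.Chars.count.go.eq_def]
    cases fuel2 <;> simp
  | succ f ih =>
    intro l cur acc fuel2 h1 h2
    cases l with
    | nil =>
      rw [PySem.Chars.splitOn.go.eq_def]
      rw [PySem.Chars.count.go.eq_def]
      cases fuel2 <;> simp
    | cons c rest =>
      obtain ⟨f2, rfl⟩ : ∃ f2, fuel2 = f2 + 1 := ⟨fuel2 - 1, by simp at h2; omega⟩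
      have hsep : 0 < sep.length := List.length_pos_of_ne_nil hs
      rw [PySem.Chars.splitOn.go.eq_def]
      conv_rhs => rw [PySem.Chars.count.go.eq_def]
      simp only
      split_ifs with h
      · have hd : (List.drop sep.length (c :: rest)).length ≤ f := by
          simp at h1 ⊢; omega
        have hd2 : (List.drop sep.length (c :: rest)).length ≤ f2 := by
          simp at h2 ⊢; omega
        rw [ih _ [] _ f2 hd hd2, count_go_acc sep f2 (List.drop sep.length (c :: rest)) 1]
        simp; omega
      · exact ih rest (c :: cur) acc f2 (by simp at h1 ⊢; omega) (by simp at h2 ⊢; omega)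

-- the split/count identity: len(x.split(sep)) = x.count(sep) + 1 for nonempty sep
lemma splitOn_length (cs sep : List Char) (hs : sep ≠ []) :
    (PySem.Chars.splitOn cs sep).length = PySem.Chars.count cs sep + 1 := by
  rw [PySem.Chars.splitOn, PySem.Chars.count]
  rw [if_neg (by simpa [List.isEmpty_iff] using hs)]
  rw [splitOn_go_length sep hs (cs.length + 1) cs [] [] cs.length (by omega) le_rfl]
  simp; omega

lemma enumerate_map {α β : Type} (f : α → β) : ∀ (xs : List α) (k : Int),
    PySem.List.enumerate (xs.map f) k = (PySem.List.enumerate xs k).map (fun ix => (ix.1, f ix.2)) := by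
  intro xs
  induction xs with
  | nil => intro k; simp [PySem.List.enumerate]
  | cons x t ih => intro k; simp [PySem.List.enumerate, ih]

lemma enumerate_nonneg {α : Type} : ∀ (xs : List α) (k : Int) (ix : Int × α),
    0 ≤ k → ix ∈ PySem.List.enumerate xs k → 0 ≤ ix.1 := by
  intro xs
  induction xs with
  | nil => intro k ix _ h; simp [PySem.List.enumerate] at h
  | cons x t ih =>
    intro k ix hk h
    rw [PySem.List.enumerate] at h
    rcases List.mem_cons.mp h with rfl | h
    · exact hk
    · exact ih (k + 1) ix (by omega) h

-- A reduced to space counts over the dropLast'd '.'-segments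
lemma sentence_lengths_eq_mid (s : String) : sentence_lengths s
    = (PySem.List.enumerate ((PySem.Chars.splitOn
        (PySem.Chars.replace (PySem.Chars.replace (PySem.Chars.replace
          (PySem.Chars.replace (PySem.Chars.replace s.toList ['!'] ['.'])
            ['?'] ['.']) [';'] ['.']) ['"'] []) ['\''] []) ['.']).dropLast) 0).map
      (fun ip => if ip.1 = 0 then (PySem.Chars.count ip.2 [' '] : Int) + 1
                 else (PySem.Chars.count ip.2 [' '] : Int)) := by
  unfold sentence_lengths
  simp only [PySem.List.foldl_append_singleton_eq_map, PySem.List.slice_to_neg_one,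
    List.nil_append, enumerate_map, List.map_map]
  apply List.map_congr_left
  intro ix hix
  have h0 : 0 ≤ ix.1 := enumerate_nonneg _ 0 ix le_rfl hix
  simp only [Function.comp, PySem.List.slice_from_one]
  by_cases h : ix.1 = 0
  · rw [if_neg (by omega), if_pos h, splitOn_length _ _ (by simp)]
    push_cast; ring
  · rw [if_pos (by omega), if_neg h, List.length_tail, splitOn_length _ _ (by simp)]
    simp

-- the enumerate/map form equals pvTarget with credit 0 1
lemma mid_eq_pvTarget (segs : List (List Char)) :
    (PySem.List.enumerate segs.dropLast 0).map
      (fun ip => if ip.1 = 0 then (PySem.Chars.count ip.2 [' '] : Int) + 1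
                 else (PySem.Chars.count ip.2 [' '] : Int))
      = pvTarget segs 0 1 := by
  cases segs with
  | nil => simp [pvTarget, PySem.List.enumerate]
  | cons seg rest =>
    cases rest with
    | nil => simp [pvTarget, PySem.List.enumerate]
    | cons a t =>
      rw [List.dropLast_cons_of_ne_nil (List.cons_ne_nil a t), PySem.List.enumerate]
      simp only [List.map_cons, pvTarget, if_true]
      rw [enumerate_map_pos _ (0 + 1) (by norm_num), pvTarget_zero]
      norm_num [add_comm]

lemma sentence_lengths_eq_alt (s : String) : sentence_lengths s = sentence_lengths_alt s := by
  rw [sentence_lengths_eq_mid]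
  unfold sentence_lengths_alt
  rw [foldl_eq_pvLens s.toList [] 0 1, List.nil_append, pvLens_eq_pvTarget]
  rw [replace_single, replace_single, replace_single, replace_del, replace_del,
    splitOn_eq_pvSegs, mid_eq_pvTarget]
  congr 3
  simp only [pvClean, List.map_map]
  congr 2
  funext c
  simp only [Function.comp, pvNorm]
  by_cases h1 : c = '!' <;> by_cases h2 : c = '?' <;> by_cases h3 : c = ';' <;>
    simp_all

-- ===== VERDICT (by name: the statement is the Claim_ definition above) =====
theorem sentence_lengths_spec : Claim_equal_sentence_lengths := by
  intro s _
  unfold Spec_sentence_lengths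
  exact sentence_lengths_eq_alt s
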